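-- pv_equiv track=rewrite | github.com/PedroNJorge/Introduction-to-Programming-Python | Problem Sets/Class_004/ex033.py | largest_sequence
-- ===== SOURCE A (Python) =====
-- def largest_sequence(num):
--     num = str(num)
--     max_counter = 1
--     counter = 1
--     prev = int(num[0])
--
--     for i in num[1:]:
--         if int(i) > prev:
--             counter += 1
--         else:
--             if max_counter < counter:
--                 max_counter = counter
--             counter = 1
--         prev = int(i)
--
--     return max(max_counter, counter)
-- ===== SOURCE B (Python) =====
-- def largest_sequence(num):
--     d = [int(c) for c in str(num)]
--
--     def run_len(t):
--         # length of the strictly increasing prefix of t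
--         if len(t) >= 2 and t[1] > t[0]:
--             return 1 + run_len(t[1:])
--         return 1
--
--     best = 0
--     for i in range(len(d)):
--         L = run_len(d[i:])
--         if L > best:
--             best = L
--     return best
-- ===== Notes on version B (the rewrite author's own statement) =====
-- stated objective: alternative
-- what changed: B is a brute-force max-over-starting-positions algorithm: for every suffix of the digit list it recursively measures the strictly increasing prefix run and takes the maximum, an O(n^2) staged computation instead of A's single O(n) stateful counter/max_counter/prev pass.
import Mathlib
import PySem

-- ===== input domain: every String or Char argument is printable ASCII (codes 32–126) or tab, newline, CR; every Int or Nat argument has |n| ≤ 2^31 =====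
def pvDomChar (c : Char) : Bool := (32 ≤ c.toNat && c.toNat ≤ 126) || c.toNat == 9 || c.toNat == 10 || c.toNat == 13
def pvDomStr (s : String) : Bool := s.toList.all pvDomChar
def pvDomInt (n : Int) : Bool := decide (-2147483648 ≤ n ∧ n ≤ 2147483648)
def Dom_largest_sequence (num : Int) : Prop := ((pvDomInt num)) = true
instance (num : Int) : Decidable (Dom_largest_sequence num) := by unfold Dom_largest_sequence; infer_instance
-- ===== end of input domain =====

-- B replaces A's single stateful counter/max_counter/prev pass by a brute-force
-- max over starting positions: for each suffix of the digit list a recursive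
-- helper measures its strictly increasing prefix; equivalence proved on num ≥ 0
-- (negative num makes both raise ValueError at int('-')).


-- ===== PORT A =====
-- int(c) for a single character; exact on digits (Pre_ ensures str(num) is all digits)
def pvInt1 (c : Char) : Int := (PySem.Int.ofChars? [c]).getD 0

def largest_sequence (num : Int) : Int :=
  let s := PySem.Int.toChars num
  -- prev = int(num[0]); str(num) is never empty, so the headD default is never used
  let prev := pvInt1 (s.headD ' ')
  let st := (s.drop 1).foldl
    (fun (st : Int × Int × Int) i =>
      let (mc, c, prev) := st
      let v := pvInt1 i
      if v > prev then (mc, c + 1, v)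
      else ((if mc < c then c else mc), 1, v))
    (1, 1, prev)
  max st.1 st.2.1

-- ===== PORT B =====
-- run_len(t): length of the strictly increasing prefix of t
def pvRunLen : List Int → Int
  | a :: b :: t => if b > a then 1 + pvRunLen (b :: t) else 1
  | _ => 1

-- the 'for i in range(len(d))' loop over the suffixes d[i:], carrying best
def pvBest : List Int → Int → Int
  | [], best => best
  | a :: t, best =>
      let L := pvRunLen (a :: t)
      pvBest t (if L > best then L else best)

def largest_sequence_alt (num : Int) : Int :=
  let d := (PySem.Int.toChars num).map pvInt1
  pvBest d 0

-- ===== PRECONDITION & SPEC =====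
-- Pre_ excludes negative num, on which str(num) starts with '-' and both A and B raise ValueError at int('-').
def Pre_largest_sequence (num : Int) : Prop := 0 ≤ num
instance (num : Int) : Decidable (Pre_largest_sequence num) := by unfold Pre_largest_sequence; infer_instance
def pvWitness_largest_sequence : Int := 123450

def Spec_largest_sequence (num : Int) (out : Int) : Prop := out = largest_sequence_alt num
instance (num : Int) (out : Int) : Decidable (Spec_largest_sequence num out) := by unfold Spec_largest_sequence; infer_instance

-- ===== CLAIM (what is proved, stated in full; the proofs are below) =====
def Claim_equal_largest_sequence : Prop := ∀ (num : Int), Dom_largest_sequence num → Pre_largest_sequence num → Spec_largest_sequence num (largest_sequence num)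

-- ===== LEMMAS AND PROOFS =====

theorem pvRunLen_pos : ∀ (t : List Int), 1 ≤ pvRunLen t
  | [] => by simp [pvRunLen]
  | [_] => by simp [pvRunLen]
  | a :: b :: u => by
      simp only [pvRunLen]
      split_ifs with h
      · have := pvRunLen_pos (b :: u); omega
      · omega

theorem pvBest_acc (t : List Int) : ∀ b : Int, 0 ≤ b → pvBest t b = max b (pvBest t 0) := by
  induction t with
  | nil => intro b hb; simp [pvBest]; omega
  | cons a t ih =>
      intro b hb
      have := pvRunLen_pos (a :: t)
      simp only [pvBest]
      rw [ih _ (by split_ifs <;> omega), ih (if pvRunLen (a :: t) > 0 then pvRunLen (a :: t) else 0) (by split_ifs <;> omega)]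
      split_ifs <;> omega

theorem pv_loop_eq (rest : List Int) : ∀ (p mc c : Int), 1 ≤ c → 1 ≤ mc →
    (let st := rest.foldl
        (fun (st : Int × Int × Int) v =>
          let (mc, c, prev) := st
          if v > prev then (mc, c + 1, v)
          else ((if mc < c then c else mc), 1, v))
        (mc, c, p);
      max st.1 st.2.1)
    = max mc (max (c - 1 + pvRunLen (p :: rest)) (pvBest rest 0)) := by
  induction rest with
  | nil =>
      intro p mc c hc hmc
      simp only [List.foldl, pvRunLen, pvBest]
      omega
  | cons x xs ih =>
      intro p mc c hc hmc
      simp only [List.foldl]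
      by_cases h : x > p
      · simp only [if_pos h]
        rw [ih x mc (c + 1) (by omega) hmc]
        have h1 : pvRunLen (p :: x :: xs) = 1 + pvRunLen (x :: xs) := by
          simp [pvRunLen, h]
        have h2 : pvBest (x :: xs) 0 = max (pvRunLen (x :: xs)) (pvBest xs 0) := by
          simp only [pvBest]
          have := pvRunLen_pos (x :: xs)
          rw [pvBest_acc _ _ (by split_ifs <;> omega)]
          split_ifs <;> omega
        have := pvRunLen_pos (x :: xs)
        rw [h1, h2]; omega
      · simp only [if_neg h]
        rw [ih x (if mc < c then c else mc) 1 (by omega) (by split_ifs <;> omega)]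
        have h1 : pvRunLen (p :: x :: xs) = 1 := by
          simp [pvRunLen, h]
        have h2 : pvBest (x :: xs) 0 = max (pvRunLen (x :: xs)) (pvBest xs 0) := by
          simp only [pvBest]
          have := pvRunLen_pos (x :: xs)
          rw [pvBest_acc _ _ (by split_ifs <;> omega)]
          split_ifs <;> omega
        rw [h1, h2]
        split_ifs <;> omega

theorem pv_toChars_core_ne (b : Nat) : ∀ (f n : Nat) (acc : List Char), acc ≠ [] →
    Nat.toDigitsCore b f n acc ≠ [] := by
  intro f
  induction f with
  | zero => intro n acc h; simpa [Nat.toDigitsCore]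
  | succ f ih =>
      intro n acc h
      simp only [Nat.toDigitsCore]
      split
      · simp
      · exact ih _ _ (by simp)

theorem pv_toChars_ne (num : Int) : PySem.Int.toChars num ≠ [] := by
  unfold PySem.Int.toChars
  split
  · simp
  · unfold Nat.toDigits
    simp only [Nat.toDigitsCore]
    split
    · simp
    · exact pv_toChars_core_ne 10 _ _ _ (by simp)

theorem pv_main (num : Int) : largest_sequence num = largest_sequence_alt num := by
  unfold largest_sequence largest_sequence_alt
  cases hs : PySem.Int.toChars num with
  | nil => exact absurd hs (pv_toChars_ne num)
  | cons h t =>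
      simp only [List.headD, List.drop, List.map]
      rw [← List.foldl_map (f := pvInt1)
        (g := fun (st : Int × Int × Int) v =>
          let (mc, c, prev) := st
          if v > prev then (mc, c + 1, v)
          else ((if mc < c then c else mc), 1, v))]
      have := pv_loop_eq (t.map pvInt1) (pvInt1 h) 1 1 le_rfl le_rfl
      simp only at this
      rw [this]
      have h2 : pvBest (pvInt1 h :: t.map pvInt1) 0
          = max (pvRunLen (pvInt1 h :: t.map pvInt1)) (pvBest (t.map pvInt1) 0) := by
        simp only [pvBest]
        have := pvRunLen_pos (pvInt1 h :: t.map pvInt1)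
        rw [pvBest_acc _ _ (by split_ifs <;> omega)]
        split_ifs <;> omega
      have := pvRunLen_pos (pvInt1 h :: t.map pvInt1)
      omega

-- ===== VERDICT (by name: the statement is the Claim_ definition above) =====
theorem largest_sequence_spec : Claim_equal_largest_sequence := by
  intro num _ _
  unfold Spec_largest_sequence
  exact pv_main num
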